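-- pv_equiv track=rewrite | github.com/iandioch/solutions | advent_of_code/2020/20/part2.py | get_grid_ids
-- ===== SOURCE A (Python) =====
-- def get_grid_ids(grid):
--     minx = min(x[0] for x in grid)
--     maxx = max(x[0] for x in grid)
--     miny = min(x[1] for x in grid)
--     maxy = max(x[1] for x in grid)
--
--     out = []
--     for y in range(miny, maxy+1):
--         row = []
--         for x in range(minx, maxx+1):
--             pos = (x,y)
--             if pos in grid:
--                 row.append(grid[pos])
--             else:
--                 row.append(None)
--         out.append(row)
--     return out
-- ===== SOURCE B (Python) =====
-- def get_grid_ids(grid):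
--     minx = min(x[0] for x in grid)
--     maxx = max(x[0] for x in grid)
--     miny = min(x[1] for x in grid)
--     maxy = max(x[1] for x in grid)
--     out = [[None] * (maxx - minx + 1) for _ in range(maxy - miny + 1)]
--     for (x, y), val in grid.items():
--         out[y - miny][x - minx] = val
--     return out
-- ===== Notes on version B (the rewrite author's own statement) =====
-- stated objective: alternative
-- what changed: Replaces A's per-cell gather loop (membership test + lookup for every cell of the bounding box) with a preallocated None-filled grid and a single scatter pass over the dict items; Pre_ excludes the empty dict (min() raises ValueError) and, on the Lean assoc-list side, duplicate (x,y) keys, which a Python dict cannot hold and on which the first/last-match order is accidental.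
import Mathlib
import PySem

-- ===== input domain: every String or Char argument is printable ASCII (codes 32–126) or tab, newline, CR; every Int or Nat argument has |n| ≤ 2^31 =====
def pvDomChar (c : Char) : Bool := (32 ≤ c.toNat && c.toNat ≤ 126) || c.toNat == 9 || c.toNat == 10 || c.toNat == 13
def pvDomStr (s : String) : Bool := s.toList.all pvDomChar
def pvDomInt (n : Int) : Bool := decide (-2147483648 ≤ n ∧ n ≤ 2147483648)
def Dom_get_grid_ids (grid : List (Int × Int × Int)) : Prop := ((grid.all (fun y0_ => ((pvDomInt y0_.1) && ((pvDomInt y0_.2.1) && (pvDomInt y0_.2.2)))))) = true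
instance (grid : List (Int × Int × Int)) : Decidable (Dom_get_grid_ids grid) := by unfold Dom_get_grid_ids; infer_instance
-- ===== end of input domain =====

-- B replaces A's per-cell gather (membership test + first-match lookup for every cell of the
-- bounding box) by preallocating a None-filled grid and scattering the dict items into it once.

-- ===== PORT A =====
-- grid[pos] on the assoc-list view of the Python dict: value of the FIRST entry with key (x, y)
def pvLookup (grid : List (Int × Int × Int)) (x y : Int) : Option Int :=
  (grid.find? (fun t => t.1 == x && t.2.1 == y)).map (fun t => t.2.2)

def get_grid_ids (grid : List (Int × Int × Int)) : List (List (Option Int)) :=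
  match PySem.List.min? (grid.map (fun t => t.1)) (fun v => v),
        PySem.List.max? (grid.map (fun t => t.1)) (fun v => v),
        PySem.List.min? (grid.map (fun t => t.2.1)) (fun v => v),
        PySem.List.max? (grid.map (fun t => t.2.1)) (fun v => v) with
  | some minx, some maxx, some miny, some maxy =>
      (PySem.List.pyRange miny (maxy + 1) 1).foldl (fun out y =>
        out ++ [(PySem.List.pyRange minx (maxx + 1) 1).foldl (fun row x =>
          row ++ [if grid.any (fun t => t.1 == x && t.2.1 == y) then pvLookup grid x y
                  else none]) []]) []
  | _, _, _, _ => []   -- unreachable under Pre_ (Python raises ValueError on an empty dict)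

-- ===== PORT B =====
def get_grid_ids_alt (grid : List (Int × Int × Int)) : List (List (Option Int)) :=
  match PySem.List.min? (grid.map (fun t => t.1)) (fun v => v) with
  | none => []   -- unreachable under Pre_ (Python raises ValueError on an empty dict)
  | some minx =>
    match PySem.List.max? (grid.map (fun t => t.1)) (fun v => v) with
    | none => []
    | some maxx =>
      match PySem.List.min? (grid.map (fun t => t.2.1)) (fun v => v) with
      | none => []
      | some miny =>
        match PySem.List.max? (grid.map (fun t => t.2.1)) (fun v => v) with
        | none => []
        | some maxy =>
          grid.foldl (fun out t =>
              PySem.List.pySetD out (t.2.1 - miny)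
                (PySem.List.pySetD (PySem.List.pyGetD out (t.2.1 - miny) [])
                  (t.1 - minx) (some t.2.2)))
            (List.replicate (maxy - miny + 1).toNat
              (List.replicate (maxx - minx + 1).toNat none))

-- ===== PRECONDITION & SPEC =====
-- Pre_ excludes the empty dict (A raises ValueError on min()) and assoc lists with duplicate
-- (x, y) keys, which a Python dict cannot hold: there the assoc-list first/last-match order is
-- accidental (A's port keeps the first entry, B's the last).
def Pre_get_grid_ids (grid : List (Int × Int × Int)) : Prop :=
  grid ≠ [] ∧ (grid.map (fun t => (t.1, t.2.1))).Nodup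
instance (grid : List (Int × Int × Int)) : Decidable (Pre_get_grid_ids grid) := by
  unfold Pre_get_grid_ids; infer_instance

def pvWitness_get_grid_ids : (List (Int × Int × Int)) := [(0, 0, 5), (1, 1, 7)]

def Spec_get_grid_ids (grid : List (Int × Int × Int)) (out : List (List (Option Int))) : Prop :=
  out = get_grid_ids_alt grid
instance (grid : List (Int × Int × Int)) (out : List (List (Option Int))) :
    Decidable (Spec_get_grid_ids grid out) := by unfold Spec_get_grid_ids; infer_instance

-- ===== CLAIM (what is proved, stated in full; the proofs are below) =====
def Claim_equal_get_grid_ids : Prop := ∀ (grid : List (Int × Int × Int)),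
  Dom_get_grid_ids grid → Pre_get_grid_ids grid →
  Spec_get_grid_ids grid (get_grid_ids grid)

-- ===== LEMMAS AND PROOFS =====

-- cell (r, c) of a dense grid, with out-of-range defaults (only used in the proofs)
def pvCell (g : List (List (Option Int))) (r c : Nat) : Option Int :=
  (g[r]?.getD [])[c]?.getD none

-- B's scatter step (proof-side name for the lambda in get_grid_ids_alt; definitionally equal)
def pvStep (minx miny : Int) (out : List (List (Option Int))) (t : Int × Int × Int) :
    List (List (Option Int)) :=
  PySem.List.pySetD out (t.2.1 - miny)
    (PySem.List.pySetD (PySem.List.pyGetD out (t.2.1 - miny) []) (t.1 - minx) (some t.2.2))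

theorem pv_shape (minx maxx miny maxy : Int) (W H : Nat)
    (hH : (H : Int) = maxy - miny + 1)
    (l : List (Int × Int × Int)) :
    ∀ acc : List (List (Option Int)), acc.length = H → (∀ r ∈ acc, r.length = W) →
    (∀ t ∈ l, minx ≤ t.1 ∧ t.1 ≤ maxx ∧ miny ≤ t.2.1 ∧ t.2.1 ≤ maxy) →
    (l.foldl (pvStep minx miny) acc).length = H ∧
      ∀ r ∈ l.foldl (pvStep minx miny) acc, r.length = W := by
  induction l with
  | nil => intro acc hlen hrow _; exact ⟨hlen, hrow⟩
  | cons t ls ih =>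
    intro acc hlen hrow hb
    obtain ⟨hb1, hb2, hb3, hb4⟩ := hb t (List.mem_cons_self ..)
    have h0 : (0:Int) ≤ t.2.1 - miny := by omega
    have hrowlen : (PySem.List.pyGetD acc (t.2.1 - miny) []).length = W := by
      apply hrow
      exact PySem.List.pyGetD_mem acc [] (by simp [PySem.Raise.InRange]; omega)
    have hstep : pvStep minx miny acc t =
        acc.set (t.2.1 - miny).toNat
          ((PySem.List.pyGetD acc (t.2.1 - miny) []).set (t.1 - minx).toNat (some t.2.2)) := by
      unfold pvStep
      rw [PySem.List.pySetD_of_nonneg _ _ (show (0:Int) ≤ t.1 - minx by omega),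
          PySem.List.pySetD_of_nonneg _ _ h0]
    rw [List.foldl_cons, hstep]
    apply ih
    · simpa using hlen
    · intro r hr
      rcases List.mem_or_eq_of_mem_set hr with h | h
      · exact hrow r h
      · subst h; simpa using hrowlen
    · exact fun t' ht' => hb t' (List.mem_cons_of_mem _ ht')

theorem pv_cell (minx maxx miny maxy : Int) (W H : Nat)
    (hW : (W : Int) = maxx - minx + 1) (hH : (H : Int) = maxy - miny + 1)
    (x y : Int) (hx1 : minx ≤ x) (hx2 : x ≤ maxx) (hy1 : miny ≤ y)
    (l : List (Int × Int × Int)) :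
    ∀ acc : List (List (Option Int)), acc.length = H → (∀ r ∈ acc, r.length = W) →
    (∀ t ∈ l, minx ≤ t.1 ∧ t.1 ≤ maxx ∧ miny ≤ t.2.1 ∧ t.2.1 ≤ maxy) →
    (l.map (fun t => (t.1, t.2.1))).Nodup →
    pvCell (l.foldl (pvStep minx miny) acc) (y - miny).toNat (x - minx).toNat =
      match l.find? (fun t => t.1 == x && t.2.1 == y) with
      | some t => some t.2.2
      | none => pvCell acc (y - miny).toNat (x - minx).toNat := by
  induction l with
  | nil => intro acc _ _ _ _; simp
  | cons t ls ih =>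
    intro acc hlen hrow hb hnd
    obtain ⟨hb1, hb2, hb3, hb4⟩ := hb t (List.mem_cons_self ..)
    have hbls : ∀ t' ∈ ls, minx ≤ t'.1 ∧ t'.1 ≤ maxx ∧ miny ≤ t'.2.1 ∧ t'.2.1 ≤ maxy :=
      fun t' ht' => hb t' (List.mem_cons_of_mem _ ht')
    have hrowlen : (PySem.List.pyGetD acc (t.2.1 - miny) []).length = W := by
      apply hrow
      exact PySem.List.pyGetD_mem acc [] (by simp [PySem.Raise.InRange]; omega)
    have hstep : pvStep minx miny acc t =
        acc.set (t.2.1 - miny).toNat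
          ((PySem.List.pyGetD acc (t.2.1 - miny) []).set (t.1 - minx).toNat (some t.2.2)) := by
      unfold pvStep
      rw [PySem.List.pySetD_of_nonneg _ _ (show (0:Int) ≤ t.1 - minx by omega),
          PySem.List.pySetD_of_nonneg _ _ (show (0:Int) ≤ t.2.1 - miny by omega)]
    have hlen' : (pvStep minx miny acc t).length = H := by rw [hstep]; simpa using hlen
    have hrow' : ∀ r ∈ pvStep minx miny acc t, r.length = W := by
      rw [hstep]; intro r hr
      rcases List.mem_or_eq_of_mem_set hr with h | h
      · exact hrow r h
      · subst h; simpa using hrowlen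
    rw [List.foldl_cons]
    by_cases hm : t.1 = x ∧ t.2.1 = y
    · -- head entry has the queried key
      have hpred : (fun t => t.1 == x && t.2.1 == y) t = true := by
        simp [hm.1, hm.2]
      rw [show List.find? (fun t => t.1 == x && t.2.1 == y) (t :: ls) = some t from List.find?_cons_of_pos hpred]
      have hnone : ls.find? (fun t => t.1 == x && t.2.1 == y) = none := by
        apply List.find?_eq_none.mpr
        intro t' ht' hp
        have : (t'.1, t'.2.1) ∈ ls.map (fun t => (t.1, t.2.1)) := List.mem_map_of_mem ht'
        have hne : (t.1, t.2.1) ∉ ls.map (fun t => (t.1, t.2.1)) :=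
          (List.nodup_cons.mp hnd).1
        simp only [beq_iff_eq, Bool.and_eq_true] at hp
        exact hne (by rw [hm.1, hm.2, ← hp.1, ← hp.2]; exact this)
      rw [ih (pvStep minx miny acc t) hlen' hrow' hbls (List.nodup_cons.mp hnd).2, hnone]
      -- the later entries never touch this cell; compute the cell of the single step
      rw [hstep]
      unfold pvCell
      have hry : (t.2.1 - miny).toNat = (y - miny).toNat := by rw [hm.2]
      have hryH : (y - miny).toNat < acc.length := by omega
      rw [hry, List.getElem?_set_self hryH]
      have hcx : (t.1 - minx).toNat = (x - minx).toNat := by rw [hm.1]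
      have hcxW : (x - minx).toNat < (PySem.List.pyGetD acc (t.2.1 - miny) []).length := by
        rw [hrowlen]; omega
      simp only [Option.getD_some]
      rw [hcx, List.getElem?_set_self hcxW]
      simp
    · -- head entry has a different key: the cell is untouched by the step
      have hpred : (fun t => t.1 == x && t.2.1 == y) t = false := by
        by_contra h
        exact hm (by simpa using (Bool.not_eq_false _).mp h)
      rw [show List.find? (fun t => t.1 == x && t.2.1 == y) (t :: ls) = List.find? (fun t => t.1 == x && t.2.1 == y) ls from List.find?_cons_of_neg (by simp [hpred])]
      rw [ih (pvStep minx miny acc t) hlen' hrow' hbls (List.nodup_cons.mp hnd).2]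
      have hcell : pvCell (pvStep minx miny acc t) (y - miny).toNat (x - minx).toNat =
          pvCell acc (y - miny).toNat (x - minx).toNat := by
        rw [hstep]; unfold pvCell
        by_cases hyy : t.2.1 = y
        · -- same row, different column
          have hxx : t.1 ≠ x := fun h => hm ⟨h, hyy⟩
          have hry : (t.2.1 - miny).toNat = (y - miny).toNat := by rw [hyy]
          have hryH : (y - miny).toNat < acc.length := by omega
          rw [hry, List.getElem?_set_self hryH]
          simp only [Option.getD_some]
          have hgetD : PySem.List.pyGetD acc (t.2.1 - miny) [] = acc[(y - miny).toNat] := by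
            rw [hyy]
            exact PySem.List.pyGetD_eq_getElem _ _ (by omega) (by rw [hlen]; omega)
          rw [hgetD, List.getElem?_set_ne (by omega)]
          simp [List.getElem?_eq_getElem hryH]
        · -- different row
          have hry : (t.2.1 - miny).toNat ≠ (y - miny).toNat := by omega
          rw [List.getElem?_set_ne hry]
      rw [hcell]

theorem pv_if (grid : List (Int × Int × Int)) (x y : Int) :
    (if grid.any (fun t => t.1 == x && t.2.1 == y) then pvLookup grid x y else none) =
      pvLookup grid x y := by
  by_cases h : grid.any (fun t => t.1 == x && t.2.1 == y) = true
  · rw [if_pos h]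
  · rw [if_neg h]
    unfold pvLookup
    rw [List.find?_eq_none.mpr] 
    · rfl
    · intro t ht hp; exact h (List.any_eq_true.mpr ⟨t, ht, hp⟩)

-- ===== VERDICT (by name: the statement is the Claim_ definition above) =====
theorem get_grid_ids_spec : Claim_equal_get_grid_ids := by
  intro grid _ hpre
  obtain ⟨hne, hnd⟩ := hpre
  unfold Spec_get_grid_ids get_grid_ids get_grid_ids_alt
  cases h1 : PySem.List.min? (grid.map (fun t => t.1)) (fun v => v) with
  | none => exact absurd (List.map_eq_nil_iff.mp ((PySem.List.min?_eq_none_iff _ _).mp h1)) hne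
  | some minx =>
  cases h2 : PySem.List.max? (grid.map (fun t => t.1)) (fun v => v) with
  | none => exact absurd (List.map_eq_nil_iff.mp ((PySem.List.max?_eq_none_iff _ _).mp h2)) hne
  | some maxx =>
  cases h3 : PySem.List.min? (grid.map (fun t => t.2.1)) (fun v => v) with
  | none => exact absurd (List.map_eq_nil_iff.mp ((PySem.List.min?_eq_none_iff _ _).mp h3)) hne
  | some miny =>
  cases h4 : PySem.List.max? (grid.map (fun t => t.2.1)) (fun v => v) with
  | none => exact absurd (List.map_eq_nil_iff.mp ((PySem.List.max?_eq_none_iff _ _).mp h4)) hne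
  | some maxy =>
  simp only []
  have hxlo : ∀ t ∈ grid, minx ≤ t.1 :=
    fun t ht => PySem.List.min?_isMin h1 _ (List.mem_map_of_mem ht)
  have hxhi : ∀ t ∈ grid, t.1 ≤ maxx :=
    fun t ht => PySem.List.max?_isMax h2 _ (List.mem_map_of_mem ht)
  have hylo : ∀ t ∈ grid, miny ≤ t.2.1 :=
    fun t ht => PySem.List.min?_isMin h3 _ (List.mem_map_of_mem ht)
  have hyhi : ∀ t ∈ grid, t.2.1 ≤ maxy :=
    fun t ht => PySem.List.max?_isMax h4 _ (List.mem_map_of_mem ht)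
  have hbounds : ∀ t ∈ grid, minx ≤ t.1 ∧ t.1 ≤ maxx ∧ miny ≤ t.2.1 ∧ t.2.1 ≤ maxy :=
    fun t ht => ⟨hxlo t ht, hxhi t ht, hylo t ht, hyhi t ht⟩
  obtain ⟨g, gs, hg⟩ := List.exists_cons_of_ne_nil hne
  have hgm : g ∈ grid := by rw [hg]; exact List.mem_cons_self ..
  have hxx : minx ≤ maxx := le_trans (hxlo g hgm) (hxhi g hgm)
  have hyy : miny ≤ maxy := le_trans (hylo g hgm) (hyhi g hgm)
  set W : Nat := (maxx - minx + 1).toNat with hWdef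
  set H : Nat := (maxy - miny + 1).toNat with hHdef
  have hW : (W : Int) = maxx - minx + 1 := Int.toNat_of_nonneg (by omega)
  have hH : (H : Int) = maxy - miny + 1 := Int.toNat_of_nonneg (by omega)
  -- the gather loop is a double map over the two ranges
  rw [PySem.List.foldl_append_singleton_eq_map
        (fun y => (PySem.List.pyRange minx (maxx + 1) 1).foldl (fun row x =>
          row ++ [if grid.any (fun t => t.1 == x && t.2.1 == y) then pvLookup grid x y
                  else none]) [])]
  simp only [PySem.List.foldl_append_singleton_eq_map, pv_if, List.nil_append]
  -- the scatter loop is the fold of pvStep over grid from the blank board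
  show _ = grid.foldl (pvStep minx miny) (List.replicate H (List.replicate W none))
  have hacc_len : (List.replicate H (List.replicate (W:Nat) (none : Option Int))).length = H := by
    simp
  have hacc_row : ∀ r ∈ List.replicate H (List.replicate (W:Nat) (none : Option Int)),
      r.length = W := by
    intro r hr; rw [List.eq_of_mem_replicate hr]; simp
  have hshape := pv_shape minx maxx miny maxy W H hH grid _ hacc_len hacc_row hbounds
  apply List.ext_getElem
  · rw [List.length_map, PySem.List.length_pyRange_one, hshape.1]; omega
  · intro r hr1 hr2
    rw [List.getElem_map, PySem.List.getElem_pyRange_one]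
    apply List.ext_getElem
    · rw [List.length_map, PySem.List.length_pyRange_one,
          hshape.2 _ (List.getElem_mem hr2)]
      omega
    · intro c hc1 hc2
      rw [List.getElem_map, PySem.List.getElem_pyRange_one]
      have hrH : r < H := by rw [hshape.1] at hr2; exact hr2
      have hcW : c < W := by rw [hshape.2 _ (List.getElem_mem hr2)] at hc2; exact hc2
      have hcell := pv_cell minx maxx miny maxy W H hW hH (minx + c) (miny + r)
        (by omega) (by omega) (by omega) grid _ hacc_len hacc_row hbounds hnd
      have hry : (miny + (r:Int) - miny).toNat = r := by omega
      have hcx : (minx + (c:Int) - minx).toNat = c := by omega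
      rw [hry, hcx] at hcell
      have hL : pvCell (grid.foldl (pvStep minx miny)
          (List.replicate H (List.replicate W none))) r c =
          (grid.foldl (pvStep minx miny)
            (List.replicate H (List.replicate W none)))[r][c] := by
        unfold pvCell
        rw [List.getElem?_eq_getElem hr2, Option.getD_some, List.getElem?_eq_getElem hc2,
            Option.getD_some]
      have hblank : pvCell (List.replicate H (List.replicate (W:Nat) (none : Option Int))) r c
          = none := by
        unfold pvCell
        rw [List.getElem?_replicate_of_lt hrH, Option.getD_some,
            List.getElem?_replicate_of_lt hcW, Option.getD_some]
      rw [hL, hblank] at hcell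
      rw [hcell]
      unfold pvLookup
      cases List.find? (fun t => t.1 == minx + ↑c && t.2.1 == miny + ↑r) grid with
      | none => rfl
      | some t => rfl
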